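-- pv_equiv track=rewrite | github.com/guzhoudiaoke/data_structure_and_algorithms | coding_interview_guide/2_link_list/8_list_partition/list_partition.py | check_partition
-- ===== SOURCE A (Python) =====
-- import operator
--
-- def check_partition(org, l, pivot):
--     index = 0
--     while index < len(l) and l[index] < pivot:
--         index += 1
--     while index < len(l) and l[index] == pivot:
--         index += 1
--     while index < len(l) and l[index] > pivot:
--         index += 1
--
--     if index != len(l):
--         return False
--
--     org = sorted(org)
--     l = sorted(l)
--     if not operator.eq(org, l):
--         return False
--
--     return True
-- ===== SOURCE B (Python) =====
-- def check_partition(org, l, pivot):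
--     c0 = sum(1 for x in l if x < pivot)
--     c1 = sum(1 for x in l if x == pivot)
--     if any(x >= pivot for x in l[:c0]):
--         return False
--     if any(x != pivot for x in l[c0:c0 + c1]):
--         return False
--     return sorted(org) == sorted(l)
-- ===== Notes on version B (the rewrite author's own statement) =====
-- stated objective: alternative
-- what changed: Replaces the sequential three-while-loop pointer scan with a counting decomposition: first count the elements below and equal to the pivot, then check that the prefix of that length is entirely below the pivot and the following segment entirely equal to it (the remainder is then forced to be above); the multiset check stays sorted(org)==sorted(l).
import Mathlib
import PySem

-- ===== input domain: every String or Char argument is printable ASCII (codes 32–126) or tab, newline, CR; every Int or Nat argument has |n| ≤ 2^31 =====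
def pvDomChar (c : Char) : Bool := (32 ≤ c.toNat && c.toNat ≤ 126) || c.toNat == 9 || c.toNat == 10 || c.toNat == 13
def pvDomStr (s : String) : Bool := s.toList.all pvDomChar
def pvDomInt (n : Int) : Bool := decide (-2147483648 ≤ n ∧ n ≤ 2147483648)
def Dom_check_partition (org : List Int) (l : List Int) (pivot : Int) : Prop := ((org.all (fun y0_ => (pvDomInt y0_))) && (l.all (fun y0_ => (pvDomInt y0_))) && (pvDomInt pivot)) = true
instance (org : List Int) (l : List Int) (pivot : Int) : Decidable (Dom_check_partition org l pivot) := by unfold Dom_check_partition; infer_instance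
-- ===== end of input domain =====

-- B replaces A's three sequential while-loops + index==len test by a counting decomposition:
-- count the elements below / equal to the pivot, then check the prefix of that length is all
-- below and the next segment all equal; objective: alternative (same cost, different algorithm).


-- ===== PORT A =====
-- one while-loop 'while index < len(l) and p(l[index]): index += 1', as recursion on the remaining length
def cpLoop (l : List Int) (p : Int → Bool) (index : Nat) : Nat :=
  if h : index < l.length then
    if p l[index] then cpLoop l p (index + 1) else index
  else index
termination_by l.length - index

def check_partition (org : List Int) (l : List Int) (pivot : Int) : Bool :=
  let i1 := cpLoop l (fun x => decide (x < pivot)) 0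
  let i2 := cpLoop l (fun x => x == pivot) i1
  let i3 := cpLoop l (fun x => decide (pivot < x)) i2
  if i3 ≠ l.length then false
  else
    let org := PySem.List.sorted org (fun x => x) false
    let l := PySem.List.sorted l (fun x => x) false
    if ¬ (org = l) then false else true

-- ===== PORT B =====
-- counts c0, c1 of the generator-sums; the slices l[:c0] and l[c0:c0+c1] have
-- 0 ≤ c0 and c0 ≤ c0+c1 ≤ len(l)+c1, so take/drop are exact for them.
def check_partition_alt (org : List Int) (l : List Int) (pivot : Int) : Bool :=
  let c0 := l.countP (fun x => decide (x < pivot))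
  let c1 := l.countP (fun x => x == pivot)
  if (l.take c0).any (fun x => decide (pivot ≤ x)) then false
  else if ((l.drop c0).take c1).any (fun x => !(x == pivot)) then false
  else decide (PySem.List.sorted org (fun x => x) false = PySem.List.sorted l (fun x => x) false)

-- ===== PRECONDITION & SPEC =====
def Spec_check_partition (org : List Int) (l : List Int) (pivot : Int) (out : Bool) : Prop := out = check_partition_alt org l pivot
instance (org : List Int) (l : List Int) (pivot : Int) (out : Bool) : Decidable (Spec_check_partition org l pivot out) := by unfold Spec_check_partition; infer_instance

-- ===== CLAIM (what is proved, stated in full; the proofs are below) =====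
def Claim_equal_check_partition : Prop := ∀ (org : List Int) (l : List Int) (pivot : Int), Dom_check_partition org l pivot → Spec_check_partition org l pivot (check_partition org l pivot)

-- ===== LEMMAS AND PROOFS =====

theorem cpLoop_le (l : List Int) (p : Int → Bool) (index : Nat) (hi : index ≤ l.length) :
    cpLoop l p index ≤ l.length := by
  fun_induction cpLoop l p index with
  | case1 i h hp ih => exact ih h
  | case2 i h hp => exact Nat.le_of_lt h
  | case3 i h => exact hi

theorem cpLoop_drop (l : List Int) (p : Int → Bool) (index : Nat) (hi : index ≤ l.length) :
    l.drop (cpLoop l p index) = (l.drop index).dropWhile p := by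
  fun_induction cpLoop l p index with
  | case1 i h hp ih =>
    rw [ih h, List.drop_eq_getElem_cons h, List.dropWhile_cons_of_pos hp]
  | case2 i h hp =>
    rw [List.drop_eq_getElem_cons h, List.dropWhile_cons_of_neg (by simp [hp])]
  | case3 i h =>
    have : i = l.length := Nat.le_antisymm hi (Nat.le_of_not_lt h)
    simp [this]

-- dropWhile jumps exactly to position n when the first n elements satisfy p and the rest do not
theorem dropWhile_eq_drop (p : Int → Bool) (l : List Int) (n : Nat)
    (h1 : ∀ x ∈ l.take n, p x = true) (h2 : ∀ x ∈ l.drop n, p x = false) :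
    l.dropWhile p = l.drop n := by
  induction l generalizing n with
  | nil => simp
  | cons a t ih =>
    cases n with
    | zero =>
      have := h2 a (by simp)
      simp [this]
    | succ m =>
      have ha : p a = true := h1 a (by simp)
      simp only [List.drop_succ_cons, List.dropWhile_cons, ha, if_true]
      exact ih m (fun x hx => h1 x (by simp [hx])) (fun x hx => h2 x (by simpa using hx))

-- ===== the bridge: A's triple-dropWhile residue is empty iff B's two segment checks pass =====
theorem chain_iff_counts (l : List Int) (pivot : Int) :
    (((l.dropWhile (fun x => decide (x < pivot))).dropWhile (fun x => x == pivot)).dropWhile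
        (fun x => decide (pivot < x)) = []) ↔
      ((l.take (l.countP (fun x => decide (x < pivot)))).any (fun x => decide (pivot ≤ x)) = false ∧
       (((l.drop (l.countP (fun x => decide (x < pivot)))).take
            (l.countP (fun x => x == pivot))).any (fun x => !(x == pivot)) = false)) := by
  set f0 : Int → Bool := fun x => decide (x < pivot) with hf0
  set f1 : Int → Bool := fun x => x == pivot with hf1
  set f2 : Int → Bool := fun x => decide (pivot < x) with hf2
  constructor
  · -- chain empty → l = A ++ B ++ C with pure classes; then counts pick out A and B
    intro h
    set A := l.takeWhile f0 with hA
    set s1 := l.dropWhile f0 with hs1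
    set B := s1.takeWhile f1 with hB
    set s2 := s1.dropWhile f1 with hs2
    have hC : ∀ x ∈ s2, f2 x = true := by
      intro x hx; exact List.dropWhile_eq_nil_iff.mp h x hx
    have hAel : ∀ x ∈ A, f0 x = true := fun x hx => List.mem_takeWhile_imp hx
    have hBel : ∀ x ∈ B, f1 x = true := fun x hx => List.mem_takeWhile_imp hx
    have hsplit : l = A ++ B ++ s2 := by
      rw [hA, hB, hs2, hs1, List.append_assoc, List.takeWhile_append_dropWhile,
        List.takeWhile_append_dropWhile]
    have hBf0 : ∀ x ∈ B, f0 x = false := by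
      intro x hx
      have := hBel x hx
      simp only [hf1, beq_iff_eq] at this
      simp [hf0, this]
    have hCf0 : ∀ x ∈ s2, f0 x = false := by
      intro x hx
      have := hC x hx
      simp only [hf2, decide_eq_true_eq] at this
      simp [hf0]; omega
    have hAf1 : ∀ x ∈ A, f1 x = false := by
      intro x hx
      have := hAel x hx
      simp only [hf0, decide_eq_true_eq] at this
      simp [hf1]; omega
    have hCf1 : ∀ x ∈ s2, f1 x = false := by
      intro x hx
      have := hC x hx
      simp only [hf2, decide_eq_true_eq] at this
      simp [hf1]; omega
    have hc0 : l.countP f0 = A.length := by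
      rw [hsplit]
      simp [List.countP_append, List.countP_eq_length.mpr hAel,
        List.countP_eq_zero.mpr (by intro x hx; simpa using hBf0 x hx),
        List.countP_eq_zero.mpr (by intro x hx; simpa using hCf0 x hx)]
    have hc1 : l.countP f1 = B.length := by
      rw [hsplit]
      simp [List.countP_append, List.countP_eq_length.mpr hBel,
        List.countP_eq_zero.mpr (by intro x hx; simpa using hAf1 x hx),
        List.countP_eq_zero.mpr (by intro x hx; simpa using hCf1 x hx)]
    have htake : l.take (l.countP f0) = A := by
      rw [hc0, hsplit, List.append_assoc, List.take_left]
    have hdrop : l.drop (l.countP f0) = B ++ s2 := by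
      rw [hc0, hsplit, List.append_assoc, List.drop_left]
    have hseg : (l.drop (l.countP f0)).take (l.countP f1) = B := by
      rw [hdrop, hc1, List.take_left]
    refine ⟨?_, ?_⟩
    · rw [htake]
      simp only [List.any_eq_false]
      intro x hx
      have := hAel x hx
      simp only [hf0, decide_eq_true_eq] at this
      simp; omega
    · rw [hseg]
      simp only [List.any_eq_false]
      intro x hx
      have := hBel x hx
      simp only [hf1, beq_iff_eq] at this
      simp [this]
  · -- segment checks pass → each dropWhile lands exactly at the counted boundary
    rintro ⟨h1, h2⟩
    set c0 := l.countP f0 with hc0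
    set c1 := l.countP f1 with hc1
    have htakeA : ∀ x ∈ l.take c0, f0 x = true := by
      intro x hx
      have := (List.any_eq_false.mp h1) x hx
      simp only [decide_eq_true_eq] at this
      simp only [hf0, decide_eq_true_eq]
      omega
    have hlenTake : (l.take c0).length = c0 := by
      simp [Nat.min_eq_left (hc0 ▸ List.countP_le_length (p := f0) (l := l))]
    have hdropA : ∀ x ∈ l.drop c0, f0 x = false := by
      have hsum : c0 = (l.take c0).countP f0 + (l.drop c0).countP f0 := by
        conv_lhs => rw [hc0, ← List.take_append_drop c0 l, List.countP_append]
      have htc : (l.take c0).countP f0 = c0 := by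
        rw [List.countP_eq_length.mpr htakeA, hlenTake]
      have : (l.drop c0).countP f0 = 0 := by omega
      intro x hx
      simpa using List.countP_eq_zero.mp this x hx
    have hdw0 : l.dropWhile f0 = l.drop c0 := dropWhile_eq_drop f0 l c0 htakeA hdropA
    set m := l.drop c0 with hm
    have hsegB : ∀ x ∈ m.take c1, f1 x = true := by
      intro x hx
      have hne := (List.any_eq_false.mp h2) x hx
      simp only [hf1]
      cases hxe : (x == pivot) with
      | true => rfl
      | false => exact absurd (by simp [hxe]) hne
    have hc1m : m.countP f1 = c1 := by
      have hsum : l.countP f1 = (l.take c0).countP f1 + m.countP f1 := by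
        conv_lhs => rw [← List.take_append_drop c0 l, List.countP_append]
      have htc : (l.take c0).countP f1 = 0 := by
        apply List.countP_eq_zero.mpr
        intro x hx
        have := htakeA x hx
        simp only [hf0, decide_eq_true_eq] at this
        simp [hf1]; omega
      omega
    have hlenTakeB : (m.take c1).length = c1 := by
      simp [Nat.min_eq_left (hc1m ▸ List.countP_le_length (p := f1) (l := m))]
    have hdropB : ∀ x ∈ m.drop c1, f1 x = false := by
      have hsum : m.countP f1 = (m.take c1).countP f1 + (m.drop c1).countP f1 := by
        conv_lhs => rw [← List.take_append_drop c1 m, List.countP_append]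
      have htc : (m.take c1).countP f1 = c1 := by
        rw [List.countP_eq_length.mpr hsegB, hlenTakeB]
      have : (m.drop c1).countP f1 = 0 := by omega
      intro x hx
      simpa using List.countP_eq_zero.mp this x hx
    have hdw1 : m.dropWhile f1 = m.drop c1 := dropWhile_eq_drop f1 m c1 hsegB hdropB
    rw [hdw0, hdw1]
    apply List.dropWhile_eq_nil_iff.mpr
    intro x hx
    have hxm : x ∈ m := List.mem_of_mem_drop hx
    have h0 := hdropA x (hm ▸ hxm)
    have h1' := hdropB x hx
    simp only [hf0, decide_eq_false_iff_not, not_lt] at h0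
    simp only [hf1, beq_eq_false_iff_ne, ne_eq] at h1'
    simp [hf2]
    omega

-- A's index after the three loops reaches len(l) exactly when the triple-dropWhile residue is empty
theorem loops_eq_len_iff (l : List Int) (pivot : Int) :
    (cpLoop l (fun x => decide (pivot < x))
      (cpLoop l (fun x => x == pivot)
        (cpLoop l (fun x => decide (x < pivot)) 0)) = l.length) ↔
    ((l.dropWhile (fun x => decide (x < pivot))).dropWhile (fun x => x == pivot)).dropWhile
        (fun x => decide (pivot < x)) = [] := by
  set i1 := cpLoop l (fun x => decide (x < pivot)) 0 with hi1
  have h1le : i1 ≤ l.length := cpLoop_le _ _ _ (Nat.zero_le _)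
  set i2 := cpLoop l (fun x => x == pivot) i1 with hi2
  have h2le : i2 ≤ l.length := cpLoop_le _ _ _ h1le
  set i3 := cpLoop l (fun x => decide (pivot < x)) i2 with hi3
  have h3le : i3 ≤ l.length := cpLoop_le _ _ _ h2le
  have hd1 : l.drop i1 = l.dropWhile (fun x => decide (x < pivot)) := by
    simpa using cpLoop_drop l _ 0 (Nat.zero_le _)
  have hd2 : l.drop i2 = (l.dropWhile (fun x => decide (x < pivot))).dropWhile (fun x => x == pivot) := by
    rw [hi2, cpLoop_drop l _ i1 h1le, hd1]
  have hd3 : l.drop i3 = ((l.dropWhile (fun x => decide (x < pivot))).dropWhile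
      (fun x => x == pivot)).dropWhile (fun x => decide (pivot < x)) := by
    rw [hi3, cpLoop_drop l _ i2 h2le, hd2]
  rw [← hd3]
  constructor
  · intro h; simp [h]
  · intro h
    have := List.drop_eq_nil_iff.mp h
    omega

-- ===== VERDICT (by name: the statement is the Claim_ definition above) =====
theorem check_partition_spec : Claim_equal_check_partition := by
  intro org l pivot _
  unfold Spec_check_partition check_partition check_partition_alt
  by_cases h : ((l.dropWhile (fun x => decide (x < pivot))).dropWhile (fun x => x == pivot)).dropWhile
      (fun x => decide (pivot < x)) = []
  · have hlen := (loops_eq_len_iff l pivot).mpr h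
    obtain ⟨hb1, hb2⟩ := (chain_iff_counts l pivot).mp h
    simp only [hlen, hb1, hb2]
    simp
  · have hlen : ¬ (cpLoop l (fun x => decide (pivot < x))
      (cpLoop l (fun x => x == pivot)
        (cpLoop l (fun x => decide (x < pivot)) 0)) = l.length) := by
      intro hc; exact h ((loops_eq_len_iff l pivot).mp hc)
    have hb : ¬ ((l.take (l.countP (fun x => decide (x < pivot)))).any (fun x => decide (pivot ≤ x)) = false ∧
       (((l.drop (l.countP (fun x => decide (x < pivot)))).take
            (l.countP (fun x => x == pivot))).any (fun x => !(x == pivot)) = false)) := by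
      intro hc; exact h ((chain_iff_counts l pivot).mpr hc)
    have hA : (if (cpLoop l (fun x => decide (pivot < x))
        (cpLoop l (fun x => x == pivot)
          (cpLoop l (fun x => decide (x < pivot)) 0))) ≠ l.length then false
      else
        if ¬ (PySem.List.sorted org (fun x => x) false = PySem.List.sorted l (fun x => x) false)
        then false else true) = false := by
      simp [hlen]
    rw [hA]
    cases h1 : (l.take (l.countP (fun x => decide (x < pivot)))).any (fun x => decide (pivot ≤ x)) with
    | true => simp [h1]
    | false =>
      cases h2 : ((l.drop (l.countP (fun x => decide (x < pivot)))).take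
          (l.countP (fun x => x == pivot))).any (fun x => !(x == pivot)) with
      | true => simp [h1, h2]
      | false => exact absurd ⟨h1, h2⟩ hb
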